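-- pv_equiv track=rewrite | github.com/GrumpyJun/MIT-OpenCourseWare | CS 6.00/ProblemSet6/P06.py | pick_best_word
-- ===== SOURCE A (Python) =====
-- def get_frequency_dict(sequence):
--     """
--     Returns a dictionary where the keys are elements of the sequence
--     and the values are integer counts, for the number of times that
--     an element is repeated in the sequence.
--
--     sequence: string or list
--     return: dictionary
--     """
--     # freqs: dictionary (element_type -> int)
--     freq = {}
--     for x in sequence:
--         freq[x] = freq.get(x,0) + 1
--     return(freq)
--
-- def pick_best_word(hand, POINTS_DICT):
--     """
--     Return the highest scoring word from points_dict that can be made with the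
--     given hand.
--     Return '.' if no words can be made with the given hand.
--     """
--
--     bestWord         = '.'                      # By default if no word can be formed, it will return exit command
--     currentBestScore = 0
--
--     for word in POINTS_DICT:
--         hasLetter = 0
--         handDict  = get_frequency_dict(hand)
--         for letter in word:
--             if handDict.get(letter, 0) > 0:     # we don't know if letter in word is in hand so use .get()
--                 hasLetter        += 1
--                 handDict[letter]  = handDict[letter] - 1
--
--         if hasLetter == len(word):
--             # Check if the current word yields better score.
--             # If yes, current word is the best word.
--             thisWordScore   = POINTS_DICT[word]
--             if thisWordScore > currentBestScore:
--                 bestWord          = word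
--                 currentBestScore  = thisWordScore
--
--     return(bestWord)
-- ===== SOURCE B (Python) =====
-- def pick_best_word(hand, POINTS_DICT):
--     """
--     Return the highest scoring word from POINTS_DICT that can be made with the
--     given hand; '.' if none.  Sort the words by descending score (stable) and
--     return the first positive-scoring word whose per-letter counts fit the hand.
--     """
--     for word, score in sorted(POINTS_DICT.items(), key=lambda kv: -kv[1]):
--         if score > 0 and all(word.count(c) <= hand.count(c) for c in word):
--             return word
--     return '.'
-- ===== Notes on version B (the rewrite author's own statement) =====
-- stated objective: faster
-- what changed: B stably sorts the dictionary items once by descending score and returns the first positive-scoring word whose per-letter counts fit the hand, replacing A's best-so-far accumulator that rebuilds and greedily decrements a fresh hand-frequency dict for every word; B stops at the first feasible word instead of scanning all words.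
import Mathlib
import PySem

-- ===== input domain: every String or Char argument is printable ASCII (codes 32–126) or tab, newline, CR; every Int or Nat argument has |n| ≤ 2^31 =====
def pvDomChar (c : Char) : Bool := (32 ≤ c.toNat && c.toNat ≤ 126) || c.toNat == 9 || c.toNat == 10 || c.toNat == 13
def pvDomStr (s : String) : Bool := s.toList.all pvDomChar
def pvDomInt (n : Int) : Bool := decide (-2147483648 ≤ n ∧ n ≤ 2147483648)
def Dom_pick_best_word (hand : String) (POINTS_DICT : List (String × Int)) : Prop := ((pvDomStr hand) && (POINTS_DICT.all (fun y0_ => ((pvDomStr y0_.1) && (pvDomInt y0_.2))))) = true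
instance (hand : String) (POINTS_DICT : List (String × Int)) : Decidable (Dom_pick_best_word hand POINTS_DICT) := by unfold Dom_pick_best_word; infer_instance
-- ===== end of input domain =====

-- B sorts the dict items by descending score (stable) and returns the first
-- positive-scoring word whose per-letter counts fit the hand, instead of A's
-- best-so-far accumulator that rebuilds and greedily decrements a hand-frequency
-- dict per word (different algorithm: sort-then-first-match; measured faster).


-- ===== PORT A =====
def get_frequency_dict (sequence : List Char) : PySem.Dict Char Int :=
  sequence.foldl (fun freq x => freq.insert x (freq.getD x 0 + 1)) PySem.Dict.empty

def pick_best_word (hand : String) (POINTS_DICT : List (String × Int)) : String :=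
  -- POINTS_DICT is a Python dict: iterate its keys, look scores up in it
  let d := PySem.Dict.ofList POINTS_DICT
  (d.keys.foldl (fun (st : String × Int) word =>
      let inner := word.toList.foldl
        (fun (s : Int × PySem.Dict Char Int) letter =>
          if s.2.getD letter 0 > 0 then (s.1 + 1, s.2.insert letter (s.2.getD letter 0 - 1))
          else s)
        (0, get_frequency_dict hand.toList)
      if inner.1 = (word.toList.length : Int) then
        let thisWordScore := d.getD word 0   -- key is present, so getD = d[word]
        if thisWordScore > st.2 then (word, thisWordScore) else st
      else st)
    (".", 0)).1

-- ===== PORT B =====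
-- all(word.count(c) <= hand.count(c) for c in word)
def pbw_can_make (hand : String) (word : String) : Bool :=
  word.toList.all (fun c =>
    PySem.Str.count word (String.ofList [c]) ≤ PySem.Str.count hand (String.ofList [c]))

-- the for-loop with its early return
def pbw_scan (hand : String) : List (String × Int) → String
  | [] => "."
  | (word, score) :: rest =>
    if 0 < score ∧ pbw_can_make hand word = true then word else pbw_scan hand rest

def pick_best_word_alt (hand : String) (POINTS_DICT : List (String × Int)) : String :=
  pbw_scan hand
    (PySem.List.sorted (PySem.Dict.ofList POINTS_DICT).items (fun kv => -kv.2) false)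

-- ===== PRECONDITION & SPEC =====
def Spec_pick_best_word (hand : String) (POINTS_DICT : List (String × Int)) (out : String) : Prop := out = pick_best_word_alt hand POINTS_DICT
instance (hand : String) (POINTS_DICT : List (String × Int)) (out : String) : Decidable (Spec_pick_best_word hand POINTS_DICT out) := by unfold Spec_pick_best_word; infer_instance

-- ===== CLAIM (what is proved, stated in full; the proofs are below) =====
def Claim_equal_pick_best_word : Prop := ∀ (hand : String) (POINTS_DICT : List (String × Int)), Dom_pick_best_word hand POINTS_DICT → Spec_pick_best_word hand POINTS_DICT (pick_best_word hand POINTS_DICT)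

-- ===== LEMMAS AND PROOFS =====

-- str.count with a single-character needle counts occurrences of that character
lemma chars_count_go_singleton (c : Char) :
    ∀ (fuel : Nat) (cs : List Char) (acc : Nat), cs.length ≤ fuel →
    PySem.Chars.count.go [c] fuel cs acc = acc + cs.count c := by
  intro fuel
  induction fuel with
  | zero =>
    intro cs acc h
    have : cs = [] := List.length_eq_zero_iff.mp (Nat.le_zero.mp h)
    subst this; simp [PySem.Chars.count.go]
  | succ n ih =>
    intro cs acc h
    cases cs with
    | nil => simp [PySem.Chars.count.go]
    | cons x t =>
      simp only [PySem.Chars.count.go]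
      by_cases hx : c = x
      · subst hx
        rw [if_pos (by simp [List.isPrefixOf])]
        simp only [List.length_singleton, List.drop_one, List.tail_cons]
        rw [ih t (acc + 1) (by simpa using h)]
        simp
        omega
      · have hpre : ¬ (List.isPrefixOf [c] (x :: t) = true) := by
          simp only [List.isPrefixOf, Bool.and_eq_true, beq_iff_eq]
          rintro ⟨hh, -⟩; exact hx hh
        rw [if_neg hpre]
        rw [ih t acc (by simpa using h)]
        simp only [List.count_cons, beq_iff_eq]
        rw [if_neg (fun hh => hx hh.symm)]
        omega

lemma chars_count_singleton (cs : List Char) (c : Char) :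
    PySem.Chars.count cs [c] = cs.count c := by
  have h0 : PySem.Chars.count cs [c] = PySem.Chars.count.go [c] cs.length cs 0 := rfl
  rw [h0]
  simpa using chars_count_go_singleton c cs.length cs 0 le_rfl

-- B's feasibility test says: every letter's count in the word fits the hand
lemma can_make_iff (hand word : String) :
    pbw_can_make hand word = true ↔
      ∀ c, (word.toList.count c : Int) ≤ (hand.toList.count c : Int) := by
  unfold pbw_can_make
  simp only [List.all_eq_true, decide_eq_true_eq, PySem.Str.count_eq, String.toList_ofList,
    chars_count_singleton]
  constructor
  · intro h c
    by_cases hc : c ∈ word.toList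
    · exact_mod_cast h c hc
    · rw [List.count_eq_zero_of_not_mem hc]
      push_cast
      positivity
  · intro h c _
    exact_mod_cast h c

-- A's inner loop counts at most one letter per character of the word.
lemma pbwA_fst_le (w : List Char) : ∀ (s : Int × PySem.Dict Char Int),
    (w.foldl (fun s letter =>
        if s.2.getD letter 0 > 0 then (s.1 + 1, s.2.insert letter (s.2.getD letter 0 - 1))
        else s) s).1 ≤ s.1 + w.length := by
  induction w with
  | nil => intro s; simp
  | cons ch rest ih =>
    intro s
    simp only [List.foldl_cons, List.length_cons]
    by_cases hg : s.2.getD ch 0 > 0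
    · simp only [if_pos hg]
      have := ih (s.1 + 1, s.2.insert ch (s.2.getD ch 0 - 1))
      push_cast at this ⊢
      omega
    · simp only [if_neg hg]
      have := ih s
      push_cast at this ⊢
      omega

-- A's greedy consumption of the hand succeeds on every letter iff every letter's
-- count fits (invariant: cnt = H - D pointwise, D the letters consumed so far).
lemma greedy_iff_counts (H : Char → Int) (w : List Char) :
    ∀ (cnt : PySem.Dict Char Int) (k : Int) (D : Char → Int),
    (∀ c, cnt.getD c 0 = H c - D c) → (∀ c, D c ≤ H c) →
    (((w.foldl (fun s letter =>
        if s.2.getD letter 0 > 0 then (s.1 + 1, s.2.insert letter (s.2.getD letter 0 - 1))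
        else s) (k, cnt)).1 = k + w.length) ↔ ∀ c, D c + (w.count c : Int) ≤ H c) := by
  induction w with
  | nil =>
    intro cnt k D hinv hD
    simpa using fun c => hD c
  | cons ch rest ih =>
    intro cnt k D hinv hD
    have hch := hinv ch
    simp only [List.foldl_cons, List.length_cons]
    by_cases hg : cnt.getD ch 0 > 0
    · have hlt : D ch < H ch := by omega
      simp only [if_pos hg]
      have hinv' : ∀ c, (cnt.insert ch (cnt.getD ch 0 - 1)).getD c 0 =
          H c - (fun c => if c = ch then D c + 1 else D c) c := by
        intro c
        rw [PySem.Dict.getD_insert]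
        by_cases hc : c = ch <;> simp [hc] <;> [omega; exact hinv c]
      have hD' : ∀ c, (fun c => if c = ch then D c + 1 else D c) c ≤ H c := by
        intro c; by_cases hc : c = ch <;> simp [hc] <;> [omega; exact hD c]
      have := ih (cnt.insert ch (cnt.getD ch 0 - 1)) (k + 1)
        (fun c => if c = ch then D c + 1 else D c) hinv' hD'
      rw [show k + 1 + (rest.length : Int) = k + (rest.length + 1 : Nat) by push_cast; ring] at this
      rw [this]
      constructor
      · intro h c
        have := h c
        by_cases hc : c = ch
        · subst hc; simp at this; simp; omega
        · simp [hc] at this; simp [Ne.symm hc]; omega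
      · intro h c
        have := h c
        by_cases hc : c = ch
        · subst hc; simp at this; simp; omega
        · simp [Ne.symm hc] at this; simp [hc]; omega
    · simp only [if_neg hg]
      constructor
      · intro he
        have hle := pbwA_fst_le rest (k, cnt)
        push_cast at he hle; omega
      · intro h
        exfalso
        have := h ch
        simp at this
        omega

-- A's full greedy check on a word equals B's count comparison
lemma greedy_eq_can_make (hand word : String) :
    ((word.toList.foldl (fun s letter =>
        if s.2.getD letter 0 > 0 then (s.1 + 1, s.2.insert letter (s.2.getD letter 0 - 1))
        else s) (0, get_frequency_dict hand.toList)).1 = (word.toList.length : Int)) ↔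
      pbw_can_make hand word = true := by
  have hcnt : ∀ c, (get_frequency_dict hand.toList).getD c 0 =
      (hand.toList.count c : Int) - (fun _ => (0 : Int)) c := by
    intro c
    simp only [get_frequency_dict, PySem.Dict.foldl_insert_getD_add_one_eq_counter,
      PySem.Dict.getD_counter]
    simp
  have := greedy_iff_counts (fun c => (hand.toList.count c : Int)) word.toList
    (get_frequency_dict hand.toList) 0 (fun _ => 0) hcnt (fun c => by positivity)
  simp only [zero_add] at this
  rw [this, can_make_iff]

-- the proof-side shape of A's outer step, over (word, score) items
def pbw_g (hand : String) (st : String × Int) (p : String × Int) : String × Int :=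
  if pbw_can_make hand p.1 = true ∧ p.2 > st.2 then p else st

-- the proof-side shape of B's scan, carrying the score of the word it returns
def pbw_scanP (hand : String) : List (String × Int) → String × Int
  | [] => (".", 0)
  | p :: rest => if 0 < p.2 ∧ pbw_can_make hand p.1 = true then p else pbw_scanP hand rest

lemma pbw_scan_eq_scanP (hand : String) (s : List (String × Int)) :
    pbw_scan hand s = (pbw_scanP hand s).1 := by
  induction s with
  | nil => rfl
  | cons p rest ih =>
    obtain ⟨w, v⟩ := p
    simp only [pbw_scan, pbw_scanP]
    split <;> simp [ih]

lemma scanP_snd_nonneg (hand : String) (s : List (String × Int)) :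
    0 ≤ (pbw_scanP hand s).2 := by
  induction s with
  | nil => simp [pbw_scanP]
  | cons p rest ih =>
    simp only [pbw_scanP]
    split <;> [omega; exact ih]
  
lemma scanP_eq_or_mem (hand : String) (s : List (String × Int)) :
    pbw_scanP hand s = (".", 0) ∨ pbw_scanP hand s ∈ s := by
  induction s with
  | nil => left; rfl
  | cons p rest ih =>
    simp only [pbw_scanP]
    split
    · right; exact List.mem_cons_self
    · rcases ih with h | h
      · left; exact h
      · right; exact List.mem_cons_of_mem _ h

-- inserting the next item into the sorted-so-far list commutes with the scan
lemma scanP_insertBy (hand : String) (p : String × Int) :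
    ∀ s : List (String × Int), s.Pairwise (fun a b => -a.2 ≤ -b.2) →
    pbw_scanP hand (PySem.List.insertBy (fun a b => decide (-a.2 < -b.2)) p s) =
      pbw_g hand (pbw_scanP hand s) p := by
  intro s
  induction s with
  | nil =>
    intro _
    have hins : PySem.List.insertBy (fun (a b : String × Int) => decide (-a.2 < -b.2)) p [] = [p] := rfl
    rw [hins]
    show (if 0 < p.2 ∧ pbw_can_make hand p.1 = true then p else (".", 0)) = pbw_g hand (".", 0) p
    unfold pbw_g
    by_cases hc : pbw_can_make hand p.1 = true
    · by_cases hp2 : 0 < p.2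
      · rw [if_pos ⟨hp2, hc⟩, if_pos ⟨hc, hp2⟩]
      · rw [if_neg (fun hh => hp2 hh.1), if_neg (fun hh => hp2 hh.2)]
    · rw [if_neg (fun hh => hc hh.2), if_neg (fun hh => hc hh.1)]
  | cons q t ih =>
    intro hpw
    have htail : t.Pairwise (fun a b => -a.2 ≤ -b.2) := hpw.of_cons
    have hqt : ∀ y ∈ t, y.2 ≤ q.2 := by
      intro y hy
      have := (List.pairwise_cons.mp hpw).1 y hy
      omega
    simp only [PySem.List.insertBy]
    by_cases hcmp : (-p.2 < -q.2)
    · -- p goes in front: q (and everything below) scores strictly less than p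
      rw [if_pos (by simpa using hcmp)]
      have hrnn := scanP_snd_nonneg hand (q :: t)
      have hcons : pbw_scanP hand (p :: q :: t) =
          if 0 < p.2 ∧ pbw_can_make hand p.1 = true then p else pbw_scanP hand (q :: t) := rfl
      rw [hcons]
      unfold pbw_g
      by_cases hp2 : 0 < p.2
      · have hrlt : (pbw_scanP hand (q :: t)).2 < p.2 := by
          rcases scanP_eq_or_mem hand (q :: t) with h | h
          · rw [h]; dsimp; omega
          · rcases List.mem_cons.mp h with h | h
            · rw [h]; omega
            · have := hqt _ h; omega
        by_cases hc : pbw_can_make hand p.1 = true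
        · rw [if_pos ⟨hp2, hc⟩, if_pos ⟨hc, hrlt⟩]
        · rw [if_neg (fun hh => hc hh.2), if_neg (fun hh => hc hh.1)]
      · rw [if_neg (fun hh => hp2 hh.1), if_neg (by rintro ⟨-, hh⟩; omega)]
    · -- p goes after q
      rw [if_neg (by simpa using hcmp)]
      have hqp : p.2 ≤ q.2 := by omega
      have hconsL : pbw_scanP hand (q :: PySem.List.insertBy (fun (a b : String × Int) => decide (-a.2 < -b.2)) p t) =
          if 0 < q.2 ∧ pbw_can_make hand q.1 = true then q
          else pbw_scanP hand (PySem.List.insertBy (fun (a b : String × Int) => decide (-a.2 < -b.2)) p t) := rfl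
      have hconsR : pbw_scanP hand (q :: t) =
          if 0 < q.2 ∧ pbw_can_make hand q.1 = true then q else pbw_scanP hand t := rfl
      rw [hconsL, hconsR]
      by_cases hq : 0 < q.2 ∧ pbw_can_make hand q.1 = true
      · rw [if_pos hq, if_pos hq]
        unfold pbw_g
        rw [if_neg (by rintro ⟨-, h⟩; omega)]
      · rw [if_neg hq, if_neg hq]
        exact ih htail

-- folding A's step over a list equals scanning its stable descending sort
lemma foldl_g_eq_scan_sorted (hand : String) (L : List (String × Int)) :
    L.foldl (pbw_g hand) (".", 0) =
      pbw_scanP hand (PySem.List.sorted L (fun kv => -kv.2) false) := by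
  induction L using List.reverseRecOn with
  | nil => rfl
  | append_singleton L p ih =>
    rw [PySem.List.sorted_eq_foldl_insertBy, List.foldl_append, List.foldl_append]
    simp only [List.foldl_cons, List.foldl_nil]
    rw [← PySem.List.sorted_eq_foldl_insertBy]
    rw [scanP_insertBy hand p _ (PySem.List.sorted_pairwise L (fun kv => -kv.2)), ih]

-- A's step on a dict item equals pbw_g (score lookup = the item's own score)
lemma pbw_step_eq (hand : String) (d : PySem.Dict String Int) (hnd : d.keys.Nodup)
    (p : String × Int) (hp : p ∈ d.items) (st : String × Int) :
    (let inner := p.1.toList.foldl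
        (fun (s : Int × PySem.Dict Char Int) letter =>
          if s.2.getD letter 0 > 0 then (s.1 + 1, s.2.insert letter (s.2.getD letter 0 - 1))
          else s)
        (0, get_frequency_dict hand.toList)
      if inner.1 = (p.1.toList.length : Int) then
        let thisWordScore := d.getD p.1 0
        if thisWordScore > st.2 then (p.1, thisWordScore) else st
      else st) = pbw_g hand st p := by
  have hscore : d.getD p.1 0 = p.2 := by
    obtain ⟨w, v⟩ := p
    exact PySem.Dict.getD_of_mem_items d hp hnd 0
  have hfeas := greedy_eq_can_make hand p.1
  simp only [hscore, pbw_g]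
  by_cases hf : pbw_can_make hand p.1 = true
  · rw [if_pos (hfeas.mpr hf)]
    by_cases hs : p.2 > st.2
    · rw [if_pos hs, if_pos ⟨hf, hs⟩]
    · rw [if_neg hs, if_neg (by rintro ⟨-, h⟩; exact hs h)]
  · rw [if_neg (fun he => hf (hfeas.mp he)), if_neg (by rintro ⟨h, -⟩; exact hf h)]

-- the whole of A over a nodup-keyed dict equals B's sort-and-scan
lemma pbw_outer_eq (hand : String) (d : PySem.Dict String Int) (hnd : d.keys.Nodup) :
    (d.keys.foldl (fun (st : String × Int) word =>
      let inner := word.toList.foldl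
        (fun (s : Int × PySem.Dict Char Int) letter =>
          if s.2.getD letter 0 > 0 then (s.1 + 1, s.2.insert letter (s.2.getD letter 0 - 1))
          else s)
        (0, get_frequency_dict hand.toList)
      if inner.1 = (word.toList.length : Int) then
        let thisWordScore := d.getD word 0
        if thisWordScore > st.2 then (word, thisWordScore) else st
      else st) (".", 0)).1 =
    pbw_scan hand (PySem.List.sorted d.items (fun kv => -kv.2) false) := by
  have hkeys : d.keys = d.items.map (·.1) := rfl
  rw [hkeys, List.foldl_map]
  rw [PySem.List.foldl_congr_mem d.items _ (fun st p => pbw_g hand st p) (".", 0)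
    (fun st p hp => pbw_step_eq hand d hnd p hp st)]
  rw [foldl_g_eq_scan_sorted hand d.items, pbw_scan_eq_scanP]

-- ===== VERDICT (by name: the statement is the Claim_ definition above) =====
theorem pick_best_word_spec : Claim_equal_pick_best_word := by
  intro hand POINTS_DICT _
  exact pbw_outer_eq hand (PySem.Dict.ofList POINTS_DICT)
    (PySem.Dict.nodup_keys_ofList POINTS_DICT)
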